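-- pv_equiv track=rewrite | github.com/Adamv1776/hydrarecon | core/memory_forensics.py | _decode_proc_address
-- ===== SOURCE A (Python) =====
-- def _decode_proc_address(addr_str: str) -> str:
--     """Decode /proc/net address format (hex IP:port)."""
--     try:
--         ip_hex, port_hex = addr_str.split(":")
--         # IP is in little-endian
--         ip_int = int(ip_hex, 16)
--         ip = ".".join(str((ip_int >> (8 * i)) & 0xFF) for i in range(4))
--         port = int(port_hex, 16)
--         return f"{ip}:{port}"
--     except Exception:
--         return addr_str
-- ===== SOURCE B (Python) =====
-- def _decode_proc_address(addr_str: str) -> str: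
--     """Decode /proc/net address format (hex IP:port)."""
--     try:
--         ip_hex, port_hex = addr_str.split(":")
--         h = format(int(ip_hex, 16) & 0xFFFFFFFF, "08x")
--         octets = [str(int(h[i:i + 2], 16)) for i in (6, 4, 2, 0)]
--         return ".".join(octets) + ":" + str(int(port_hex, 16))
--     except Exception:
--         return addr_str
-- ===== Notes on version B (the rewrite author's own statement) =====
-- stated objective: alternative
-- what changed: B renders the masked 32-bit IP as an eight-digit zero-padded hex string and decodes the four octets by re-parsing the hex-digit pairs at offsets 6,4,2,0, instead of A's arithmetic per-byte shift-and-mask generator joined into the dotted quad.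
import Mathlib
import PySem

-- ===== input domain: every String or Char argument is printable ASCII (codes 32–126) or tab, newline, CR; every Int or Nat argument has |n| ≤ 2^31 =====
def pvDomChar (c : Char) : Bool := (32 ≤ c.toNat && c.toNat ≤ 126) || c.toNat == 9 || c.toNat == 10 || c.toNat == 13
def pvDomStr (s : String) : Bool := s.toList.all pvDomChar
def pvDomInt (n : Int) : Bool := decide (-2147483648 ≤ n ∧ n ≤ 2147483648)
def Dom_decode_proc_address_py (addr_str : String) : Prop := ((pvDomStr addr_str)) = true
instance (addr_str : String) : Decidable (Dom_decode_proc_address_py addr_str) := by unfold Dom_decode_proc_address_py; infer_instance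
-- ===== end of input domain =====

-- B decodes the IP by formatting the 32-bit-masked value as eight zero-padded hex digits and
-- re-parsing the digit pairs at offsets 6,4,2,0 back into decimal octets, instead of A's per-byte
-- shift/mask generator joined into the dotted quad (objective: alternative).


-- ===== PORT A =====
-- ".".join(str((ip_int >> (8*i)) & 0xFF) for i in range(4)); '>> (8*i)' is floordiv by 2^(8*i),
-- '& 0xFF' is mod 256 (exact: Python's >> and & on any int agree with floor-div/mod by these powers of two)
def pvIpA (ip_int : Int) : String :=
  PySem.Str.join "." ((PySem.List.pyRange 0 4 1).map (fun i =>
    PySem.Int.toStr (PySem.Int.mod (PySem.Int.floordiv ip_int ((2 : Int) ^ (8 * i).toNat)) 256)))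

def decode_proc_address_py (addr_str : String) : String :=
  match PySem.Str.split? addr_str ":" with
  | some [ip_hex, port_hex] =>
    match PySem.Int.ofStrBase? ip_hex 16 with
    | none => addr_str
    | some ip_int =>
      let ip := pvIpA ip_int
      match PySem.Int.ofStrBase? port_hex 16 with
      | none => addr_str
      | some port => ip ++ ":" ++ PySem.Int.toStr port
  | _ => addr_str

-- ===== PORT B =====
-- one lowercase hex digit, as format '%x' produces
def pvHexDig (d : Int) : Char :=
  if d < 10 then Char.ofNat (48 + d).toNat else Char.ofNat (87 + d).toNat

-- format(m, "08x") for 0 ≤ m < 2^32: exactly the 8 hex digits, most significant first (exact on this range)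
def pvHex8 (m : Int) : List Char :=
  [pvHexDig (PySem.Int.mod (PySem.Int.floordiv m 268435456) 16),
   pvHexDig (PySem.Int.mod (PySem.Int.floordiv m 16777216) 16),
   pvHexDig (PySem.Int.mod (PySem.Int.floordiv m 1048576) 16),
   pvHexDig (PySem.Int.mod (PySem.Int.floordiv m 65536) 16),
   pvHexDig (PySem.Int.mod (PySem.Int.floordiv m 4096) 16),
   pvHexDig (PySem.Int.mod (PySem.Int.floordiv m 256) 16),
   pvHexDig (PySem.Int.mod (PySem.Int.floordiv m 16) 16),
   pvHexDig (PySem.Int.mod m 16)]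

-- str(int(h[i:i+2], 16)); here h holds hex digits only, so int never raises and getD 0 is unreachable
def pvOctet (h : List Char) (i : Int) : String :=
  PySem.Int.toStr ((PySem.Int.ofCharsBase? (PySem.List.slice h (some i) (some (i + 2))) 16).getD 0)

-- exactly-two-element destructuring of the split result ('ip_hex, port_hex = ...'; none = unpacking error)
def pvTwo? (xs : List String) : Option (String × String) :=
  match xs with
  | [] => none
  | a :: t =>
    match t with
    | [] => none
    | b :: u =>
      match u with
      | [] => some (a, b)
      | _ :: _ => none

-- the try-block as an Option chain; .getD addr_str is the except-branch
def decode_proc_address_py_alt (addr_str : String) : String :=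
  (((PySem.Str.split? addr_str ":").bind pvTwo?).bind fun p =>
    (PySem.Int.ofStrBase? p.1 16).bind fun ip_int =>
      -- '& 0xFFFFFFFF' is mod 2^32 (exact on any int)
      let h := pvHex8 (PySem.Int.mod ip_int 4294967296)
      let octets := ([6, 4, 2, 0] : List Int).map (pvOctet h)
      (PySem.Int.ofStrBase? p.2 16).map fun port =>
        PySem.Str.join "." octets ++ ":" ++ PySem.Int.toStr port).getD addr_str

-- ===== PRECONDITION & SPEC =====
def Spec_decode_proc_address_py (addr_str : String) (out : String) : Prop := out = decode_proc_address_py_alt addr_str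
instance (addr_str : String) (out : String) : Decidable (Spec_decode_proc_address_py addr_str out) := by unfold Spec_decode_proc_address_py; infer_instance

-- ===== CLAIM (what is proved, stated in full; the proofs are below) =====
def Claim_equal_decode_proc_address_py : Prop := ∀ (addr_str : String), Dom_decode_proc_address_py addr_str → Spec_decode_proc_address_py addr_str (decode_proc_address_py addr_str)

-- ===== LEMMAS AND PROOFS =====
-- int(<two hex digit chars>, 16) parses back to the two-digit value (finite check over Fin 16 × Fin 16)
theorem pvParsePairFin : ∀ (a b : Fin 16),
    PySem.Int.ofCharsBase? [pvHexDig (a.val : Int), pvHexDig (b.val : Int)] 16 =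
      some (16 * (a.val : Int) + (b.val : Int)) := by decide

theorem pvParsePair (a b : Int) (ha0 : 0 ≤ a) (ha : a < 16) (hb0 : 0 ≤ b) (hb : b < 16) :
    PySem.Int.ofCharsBase? [pvHexDig a, pvHexDig b] 16 = some (16 * a + b) := by
  have h := pvParsePairFin ⟨a.toNat, by omega⟩ ⟨b.toNat, by omega⟩
  have ea : ((a.toNat : Nat) : Int) = a := by omega
  have eb : ((b.toNat : Nat) : Int) = b := by omega
  rw [ea, eb] at h
  exact h

theorem pvRange4 : PySem.List.pyRange 0 4 1 = [0, 1, 2, 3] := by decide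

-- parsing a pair of digit characters back, as one value
theorem pvPairParse (a b v : Int)
    (hv : 16 * PySem.Int.mod a 16 + PySem.Int.mod b 16 = v) :
    (PySem.Int.ofCharsBase? [pvHexDig (PySem.Int.mod a 16), pvHexDig (PySem.Int.mod b 16)] 16).getD 0 = v := by
  rw [pvParsePair _ _ (PySem.Int.mod_nonneg _ (by norm_num)) (PySem.Int.mod_lt _ (by norm_num))
    (PySem.Int.mod_nonneg _ (by norm_num)) (PySem.Int.mod_lt _ (by norm_num)), Option.getD_some]
  exact hv

theorem pvOct0 (n : Int) :
    pvOctet (pvHex8 (PySem.Int.mod n 4294967296)) 6 = PySem.Int.toStr (PySem.Int.mod n 256) := by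
  unfold pvOctet
  rw [show PySem.List.slice (pvHex8 (PySem.Int.mod n 4294967296)) (some 6) (some (6 + 2)) =
      [pvHexDig (PySem.Int.mod (PySem.Int.floordiv (PySem.Int.mod n 4294967296) 16) 16), pvHexDig (PySem.Int.mod (PySem.Int.mod n 4294967296) 16)] from rfl]
  congr 1
  apply pvPairParse
  simp only [
    PySem.Int.mod_eq_emod_of_pos (show (0:Int) < 16 by norm_num),
    PySem.Int.floordiv_eq_ediv_of_pos (show (0:Int) < 16 by norm_num),
    PySem.Int.mod_eq_emod_of_pos (show (0:Int) < 256 by norm_num),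
    PySem.Int.mod_eq_emod_of_pos (show (0:Int) < 4294967296 by norm_num)]
  omega

theorem pvOct1 (n : Int) :
    pvOctet (pvHex8 (PySem.Int.mod n 4294967296)) 4 = PySem.Int.toStr (PySem.Int.mod (PySem.Int.floordiv n 256) 256) := by
  unfold pvOctet
  rw [show PySem.List.slice (pvHex8 (PySem.Int.mod n 4294967296)) (some 4) (some (4 + 2)) =
      [pvHexDig (PySem.Int.mod (PySem.Int.floordiv (PySem.Int.mod n 4294967296) 4096) 16), pvHexDig (PySem.Int.mod (PySem.Int.floordiv (PySem.Int.mod n 4294967296) 256) 16)] from rfl]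
  congr 1
  apply pvPairParse
  simp only [
    PySem.Int.mod_eq_emod_of_pos (show (0:Int) < 16 by norm_num),
    PySem.Int.mod_eq_emod_of_pos (show (0:Int) < 256 by norm_num),
    PySem.Int.floordiv_eq_ediv_of_pos (show (0:Int) < 4096 by norm_num),
    PySem.Int.floordiv_eq_ediv_of_pos (show (0:Int) < 256 by norm_num),
    PySem.Int.mod_eq_emod_of_pos (show (0:Int) < 4294967296 by norm_num)]
  omega

theorem pvOct2 (n : Int) :
    pvOctet (pvHex8 (PySem.Int.mod n 4294967296)) 2 = PySem.Int.toStr (PySem.Int.mod (PySem.Int.floordiv n 65536) 256) := by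
  unfold pvOctet
  rw [show PySem.List.slice (pvHex8 (PySem.Int.mod n 4294967296)) (some 2) (some (2 + 2)) =
      [pvHexDig (PySem.Int.mod (PySem.Int.floordiv (PySem.Int.mod n 4294967296) 1048576) 16), pvHexDig (PySem.Int.mod (PySem.Int.floordiv (PySem.Int.mod n 4294967296) 65536) 16)] from rfl]
  congr 1
  apply pvPairParse
  simp only [
    PySem.Int.mod_eq_emod_of_pos (show (0:Int) < 16 by norm_num),
    PySem.Int.mod_eq_emod_of_pos (show (0:Int) < 256 by norm_num),
    PySem.Int.floordiv_eq_ediv_of_pos (show (0:Int) < 1048576 by norm_num),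
    PySem.Int.floordiv_eq_ediv_of_pos (show (0:Int) < 65536 by norm_num),
    PySem.Int.mod_eq_emod_of_pos (show (0:Int) < 4294967296 by norm_num)]
  omega

theorem pvOct3 (n : Int) :
    pvOctet (pvHex8 (PySem.Int.mod n 4294967296)) 0 = PySem.Int.toStr (PySem.Int.mod (PySem.Int.floordiv n 16777216) 256) := by
  unfold pvOctet
  rw [show PySem.List.slice (pvHex8 (PySem.Int.mod n 4294967296)) (some 0) (some (0 + 2)) =
      [pvHexDig (PySem.Int.mod (PySem.Int.floordiv (PySem.Int.mod n 4294967296) 268435456) 16), pvHexDig (PySem.Int.mod (PySem.Int.floordiv (PySem.Int.mod n 4294967296) 16777216) 16)] from rfl]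
  congr 1
  apply pvPairParse
  simp only [
    PySem.Int.mod_eq_emod_of_pos (show (0:Int) < 16 by norm_num),
    PySem.Int.mod_eq_emod_of_pos (show (0:Int) < 256 by norm_num),
    PySem.Int.floordiv_eq_ediv_of_pos (show (0:Int) < 268435456 by norm_num),
    PySem.Int.floordiv_eq_ediv_of_pos (show (0:Int) < 16777216 by norm_num),
    PySem.Int.mod_eq_emod_of_pos (show (0:Int) < 4294967296 by norm_num)]
  omega

-- the two renderings of the decoded address agree
theorem pvFmt_eq (n p : Int) :
    pvIpA n ++ ":" ++ PySem.Int.toStr p =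
      PySem.Str.join "." (([6, 4, 2, 0] : List Int).map
        (pvOctet (pvHex8 (PySem.Int.mod n 4294967296)))) ++ ":" ++ PySem.Int.toStr p := by
  unfold pvIpA
  rw [pvRange4]
  simp only [List.map, pvOct0, pvOct1, pvOct2, pvOct3]
  norm_num [show ((2:Int) ^ Int.toNat 8) = 256 by decide,
    show ((2:Int) ^ Int.toNat 16) = 65536 by decide,
    show ((2:Int) ^ Int.toNat 24) = 16777216 by decide]

-- ===== VERDICT (by name: the statement is the Claim_ definition above) =====
theorem decode_proc_address_py_spec : Claim_equal_decode_proc_address_py := by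
  intro addr_str _
  show decode_proc_address_py addr_str = decode_proc_address_py_alt addr_str
  unfold decode_proc_address_py decode_proc_address_py_alt
  cases PySem.Str.split? addr_str ":" with
  | none => rfl
  | some parts =>
    match parts with
    | [] => rfl
    | [_] => rfl
    | _ :: _ :: _ :: _ => rfl
    | [ip_hex, port_hex] =>
      show (match PySem.Int.ofStrBase? ip_hex 16 with
        | none => addr_str
        | some ip_int =>
          let ip := pvIpA ip_int
          match PySem.Int.ofStrBase? port_hex 16 with
          | none => addr_str
          | some port => ip ++ ":" ++ PySem.Int.toStr port) =
        (((PySem.Int.ofStrBase? ip_hex 16).bind fun ip_int =>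
          let h := pvHex8 (PySem.Int.mod ip_int 4294967296)
          let octets := ([6, 4, 2, 0] : List Int).map (pvOctet h)
          (PySem.Int.ofStrBase? port_hex 16).map fun port =>
            PySem.Str.join "." octets ++ ":" ++ PySem.Int.toStr port).getD addr_str)
      generalize PySem.Int.ofStrBase? ip_hex 16 = rip
      cases rip with
      | none => rfl
      | some n =>
        show (match PySem.Int.ofStrBase? port_hex 16 with
          | none => addr_str
          | some port => pvIpA n ++ ":" ++ PySem.Int.toStr port) =
          (((PySem.Int.ofStrBase? port_hex 16).map fun port =>
            PySem.Str.join "." (([6, 4, 2, 0] : List Int).map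
              (pvOctet (pvHex8 (PySem.Int.mod n 4294967296)))) ++ ":" ++ PySem.Int.toStr port).getD addr_str)
        generalize PySem.Int.ofStrBase? port_hex 16 = rport
        cases rport with
        | none => rfl
        | some port => exact pvFmt_eq n port
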